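-- pv_equiv track=rewrite | github.com/GuillaumeCld/ClimBurst | src/utils/post_process.py | remove_treshold_contained_bursts
-- ===== SOURCE A (Python) =====
-- def remove_treshold_contained_bursts(bursts):
--     """
--     Remove the bursts that are threshold contained in another burst i.e. same z-score sign and interval contained .
--
--     Parameters:
--     - bursts: list of tuples of integers (i_min, i_max, z_score)
--
--     Returns:
--     - list of tuples of integers (i_min, i_max, z_score)
--     """
--     # Separate the bursts with positive and negative z_score
--     pos_intervals = [bursts for bursts in bursts if bursts[2] > 0]
--     neg_intervals = [bursts for bursts in bursts if bursts[2] < 0]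
--
--     # Remove the threshold contained bursts
--     if len(pos_intervals) > 0:
--         pos_intervals = remove_treshold_contained_bursts_signed(pos_intervals)
--     if len(neg_intervals) > 0:
--         neg_intervals = remove_treshold_contained_bursts_signed(neg_intervals)
--
--     # Concatenate the positive and negative filtered bursts
--     all_intervals = pos_intervals + neg_intervals
--     return all_intervals
--
-- def remove_treshold_contained_bursts_signed(intervals):
--     """
--     Remove the bursts that are included in another burst.
--
--     Parameters:
--     - intervals: list of tuples of integers (i_min, i_max, z_score) of same sign
--
--     Returns:
--     - list of tuples of integers (i_min, i_max, z_score)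
--     """
--     # Sort the intervals by the starting index and decreasing ending index
--     intervals.sort(key=lambda x: (x[0], -x[1]))
--     processed = []
--     n = len(intervals)
--     i = 1
--     current = intervals[0]
--     while i < n:
--         if intervals[i][1] > current[1]:
--             processed.append(current)
--             current = intervals[i]
--         i += 1
--     processed.append(current)
--     return processed
-- ===== SOURCE B (Python) =====
-- def _filter_signed(intervals):
--     s = sorted(intervals, key=lambda x: (x[0], -x[1]))
--     return [iv for i, iv in enumerate(s) if all(p[1] < iv[1] for p in s[:i])]
--
--
-- def remove_treshold_contained_bursts(bursts):
--     pos = [b for b in bursts if b[2] > 0]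
--     neg = [b for b in bursts if b[2] < 0]
--     return _filter_signed(pos) + _filter_signed(neg)
-- ===== Notes on version B (the rewrite author's own statement) =====
-- stated objective: alternative
-- what changed: The signed filter's stateful running-max while-loop (current/processed accumulators with in-place sort) is replaced by a declarative comprehension over the sorted list that keeps an interval iff every earlier interval in sort order has a strictly smaller end (a nested prefix rescan, no loop state and no emptiness guards).
import Mathlib
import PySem

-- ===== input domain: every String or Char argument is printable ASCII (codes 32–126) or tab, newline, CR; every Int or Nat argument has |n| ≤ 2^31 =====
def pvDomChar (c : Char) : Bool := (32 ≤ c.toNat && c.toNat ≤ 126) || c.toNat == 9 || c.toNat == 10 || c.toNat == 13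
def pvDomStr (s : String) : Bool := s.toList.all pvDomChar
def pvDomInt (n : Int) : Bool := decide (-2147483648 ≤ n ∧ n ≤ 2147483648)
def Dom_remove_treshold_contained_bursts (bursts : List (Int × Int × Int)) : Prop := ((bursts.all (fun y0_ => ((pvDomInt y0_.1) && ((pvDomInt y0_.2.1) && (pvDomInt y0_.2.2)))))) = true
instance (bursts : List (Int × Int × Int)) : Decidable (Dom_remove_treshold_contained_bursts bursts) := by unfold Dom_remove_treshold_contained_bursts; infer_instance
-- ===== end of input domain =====

-- B replaces A's stateful running-max while-loop by a declarative prefix rescan over the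
-- same stable sort ("keep an interval iff every earlier sorted interval has a strictly
-- smaller end"); objective: alternative (no speed claim).
-- A sorts a local list in place; that mutation is invisible to the caller, equivalence is about the return value.


-- ===== PORT A =====
-- the while-loop of remove_treshold_contained_bursts_signed: state (current, processed, remaining)
def pvWhileA (current : Int × Int × Int) (processed : List (Int × Int × Int)) :
    List (Int × Int × Int) → List (Int × Int × Int)
  | [] => processed ++ [current]
  | iv :: rest =>
      if iv.2.1 > current.2.1 then pvWhileA iv (processed ++ [current]) rest
      else pvWhileA current processed rest

-- remove_treshold_contained_bursts_signed; its callers guard len > 0, so the [] branch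
-- (where Python would raise IndexError on intervals[0]) is unreachable
def pvSignedA (intervals : List (Int × Int × Int)) : List (Int × Int × Int) :=
  match PySem.List.sorted2 intervals (fun x => x.1) (fun x => -x.2.1) false with
  | [] => []
  | c :: rest => pvWhileA c [] rest

def remove_treshold_contained_bursts (bursts : List (Int × Int × Int)) : List (Int × Int × Int) :=
  let pos_intervals := bursts.filter (fun b => b.2.2 > 0)
  let neg_intervals := bursts.filter (fun b => b.2.2 < 0)
  let pos_intervals := if pos_intervals.length > 0 then pvSignedA pos_intervals else pos_intervals
  let neg_intervals := if neg_intervals.length > 0 then pvSignedA neg_intervals else neg_intervals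
  pos_intervals ++ neg_intervals

-- ===== PORT B =====
-- _filter_signed: keep iv at index i of the sorted list iff all of s[:i] has end < iv's end
def pvSignedB (intervals : List (Int × Int × Int)) : List (Int × Int × Int) :=
  let s := PySem.List.sorted2 intervals (fun x => x.1) (fun x => -x.2.1) false
  ((PySem.List.enumerate s 0).filter
      (fun e => (PySem.List.slice s none (some e.1)).all (fun p => p.2.1 < e.2.2.1))).map (·.2)

def remove_treshold_contained_bursts_alt (bursts : List (Int × Int × Int)) : List (Int × Int × Int) :=
  pvSignedB (bursts.filter (fun b => b.2.2 > 0)) ++ pvSignedB (bursts.filter (fun b => b.2.2 < 0))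

-- ===== PRECONDITION & SPEC =====
def Spec_remove_treshold_contained_bursts (bursts : List (Int × Int × Int)) (out : List (Int × Int × Int)) : Prop := out = remove_treshold_contained_bursts_alt bursts
instance (bursts : List (Int × Int × Int)) (out : List (Int × Int × Int)) : Decidable (Spec_remove_treshold_contained_bursts bursts out) := by unfold Spec_remove_treshold_contained_bursts; infer_instance

-- ===== CLAIM (what is proved, stated in full; the proofs are below) =====
def Claim_equal_remove_treshold_contained_bursts : Prop := ∀ (bursts : List (Int × Int × Int)), Dom_remove_treshold_contained_bursts bursts → Spec_remove_treshold_contained_bursts bursts (remove_treshold_contained_bursts bursts)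

-- ===== LEMMAS AND PROOFS =====

-- the strict end-record sublist w.r.t. a running maximum m: common shape of both programs
def pvRec (m : Int) : List (Int × Int × Int) → List (Int × Int × Int)
  | [] => []
  | iv :: rest => if iv.2.1 > m then iv :: pvRec iv.2.1 rest else pvRec m rest

lemma pvWhileA_eq_rec (rest : List (Int × Int × Int)) :
    ∀ (c : Int × Int × Int) (acc : List (Int × Int × Int)),
    pvWhileA c acc rest = acc ++ c :: pvRec c.2.1 rest := by
  induction rest with
  | nil => intro c acc; simp [pvWhileA, pvRec]
  | cons d rest ih =>
      intro c acc
      by_cases h : d.2.1 > c.2.1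
      · simp [pvWhileA, pvRec, h, ih]
      · simp [pvWhileA, pvRec, h, ih]

lemma pvFilter_suffix (rest : List (Int × Int × Int)) :
    ∀ (pre : List (Int × Int × Int)) (m : Int),
    pre ≠ [] → (∃ p ∈ pre, p.2.1 = m) → (∀ p ∈ pre, p.2.1 ≤ m) →
    ((PySem.List.enumerate rest (pre.length : Int)).filter
        (fun e => (PySem.List.slice (pre ++ rest) none (some e.1)).all
          (fun p => p.2.1 < e.2.2.1))).map (·.2) = pvRec m rest := by
  induction rest with
  | nil => intro pre m _ _ _; simp [PySem.List.enumerate_nil, pvRec]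
  | cons d rest ih =>
      intro pre m hne ⟨w, hw, hwm⟩ hle
      rw [PySem.List.enumerate_cons]
      have hsl : PySem.List.slice (pre ++ d :: rest) none (some (pre.length : Int)) = pre := by
        rw [PySem.List.slice_to_natCast]
        simp
      by_cases h : d.2.1 > m
      · -- d is a record: kept, and becomes the new running maximum
        have hcond : pre.all (fun p => decide (p.2.1 < d.2.1)) = true := by
          simp only [List.all_eq_true, decide_eq_true_eq]
          intro p hp; exact lt_of_le_of_lt (hle p hp) h
        have step := ih (pre ++ [d]) d.2.1 (by simp)
          ⟨d, by simp, rfl⟩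
          (by intro p hp
              rcases List.mem_append.mp hp with h1 | h1
              · exact le_of_lt (lt_of_le_of_lt (hle p h1) h)
              · simp at h1; simp [h1])
        simp only [List.append_assoc, List.singleton_append, List.length_append,
          List.length_singleton] at step
        push_cast at step
        rw [List.filter_cons]
        simp [hsl, hcond, step, pvRec, h]
      · -- d is dominated: dropped, maximum unchanged
        have hcond : pre.all (fun p => decide (p.2.1 < d.2.1)) = false := by
          simp only [List.all_eq_false]
          exact ⟨w, hw, by simp; omega⟩
        have step := ih (pre ++ [d]) m (by simp)
          ⟨w, by simp [hw], hwm⟩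
          (by intro p hp
              rcases List.mem_append.mp hp with h1 | h1
              · exact hle p h1
              · simp at h1; simp [h1]; omega)
        simp only [List.append_assoc, List.singleton_append, List.length_append,
          List.length_singleton] at step
        push_cast at step
        rw [List.filter_cons]
        simp [hsl, hcond, step, pvRec, h]

lemma pvSigned_eq (l : List (Int × Int × Int)) :
    (if l.length > 0 then pvSignedA l else l) = pvSignedB l := by
  rcases hl : PySem.List.sorted2 l (fun x => x.1) (fun x => -x.2.1) false with _ | ⟨c, rest⟩
  · have : l = [] := by
      have := PySem.List.sorted2_perm l (fun x => x.1) (fun x => -x.2.1) false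
      rw [hl] at this
      exact (List.Perm.nil_eq this).symm
    subst this
    simp [pvSignedB, hl]
  · have hlen : l.length > 0 := by
      have := PySem.List.sorted2_perm l (fun x => x.1) (fun x => -x.2.1) false
      rw [hl] at this
      have := this.length_eq
      simp at this
      omega
    rw [if_pos hlen]
    unfold pvSignedA pvSignedB
    rw [hl]
    show pvWhileA c [] rest =
      ((PySem.List.enumerate (c :: rest) 0).filter
          (fun e => (PySem.List.slice (c :: rest) none (some e.1)).all
            (fun p => p.2.1 < e.2.2.1))).map (·.2)
    rw [pvWhileA_eq_rec rest c []]
    rw [PySem.List.enumerate_cons, List.filter_cons]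
    have h0 : PySem.List.slice (c :: rest) none (some (0 : Int)) = [] := by
      have := PySem.List.slice_to_natCast (c :: rest) 0
      simpa using this
    simp only [h0, List.all_nil]
    have step := pvFilter_suffix rest [c] c.2.1 (by simp) ⟨c, by simp⟩ (by simp)
    simp only [List.length_singleton, List.singleton_append] at step
    simp only [Int.natCast_one] at step
    simp [step]

-- ===== VERDICT (by name: the statement is the Claim_ definition above) =====
theorem remove_treshold_contained_bursts_spec : Claim_equal_remove_treshold_contained_bursts := by
  intro bursts _
  unfold Spec_remove_treshold_contained_bursts remove_treshold_contained_bursts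
    remove_treshold_contained_bursts_alt
  simp only [← pvSigned_eq]
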